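-- pv_equiv track=rewrite | github.com/past12am/MathIR | DatasetProcessing/aggregate_dataset.py | concatenate_answers
-- ===== SOURCE A (Python) =====
-- def concatenate_answers(answers, corr_idx):
--     res = ""
--     start_char = None
--     end_char = None
--     for idx, answer in enumerate(answers):
--         if (idx == corr_idx):
--             start_char = len(res)
--
--         res += "##{" + answer + "}##"
--
--         if (idx == corr_idx):
--             end_char = len(res)
--
--     return res, start_char, end_char
-- ===== SOURCE B (Python) =====
-- def concatenate_answers(answers, corr_idx):
--     res = "".join("##{" + a + "}##" for a in answers)
--     if 0 <= corr_idx < len(answers):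
--         start = sum(len(a) + 6 for a in answers[:corr_idx])
--         return res, start, start + len(answers[corr_idx]) + 6
--     return res, None, None
-- ===== Notes on version B (the rewrite author's own statement) =====
-- stated objective: simpler
-- what changed: B builds the concatenation once with ''.join and, when corr_idx is a valid index, computes the offsets arithmetically as prefix-length sums (len+6 per decorated answer) instead of reading len(res) inside per-item branches of the loop.
import Mathlib
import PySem

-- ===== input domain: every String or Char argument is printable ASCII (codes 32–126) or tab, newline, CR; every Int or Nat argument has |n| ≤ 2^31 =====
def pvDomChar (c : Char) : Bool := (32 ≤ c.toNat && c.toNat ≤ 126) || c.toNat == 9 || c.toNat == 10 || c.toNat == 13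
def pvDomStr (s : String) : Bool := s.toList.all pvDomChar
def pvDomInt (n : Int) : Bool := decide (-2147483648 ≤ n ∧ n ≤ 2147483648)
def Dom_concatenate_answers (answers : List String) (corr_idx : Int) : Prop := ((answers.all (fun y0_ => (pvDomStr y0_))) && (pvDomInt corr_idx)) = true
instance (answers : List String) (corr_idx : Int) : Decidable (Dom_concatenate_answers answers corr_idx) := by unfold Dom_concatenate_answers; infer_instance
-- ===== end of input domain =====

-- B builds the joined string once and computes the offsets arithmetically from prefix lengths
-- (objective: simpler — no per-item branching on len(res) inside the loop).

-- ===== PORT A =====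
-- loop body of A: the per-iteration update of (res, start_char, end_char)
def pvStepA (corr_idx : Int) (st : String × Option Int × Option Int) (p : Int × String) :
    String × Option Int × Option Int :=
  let start_char := if p.1 = corr_idx then some (PySem.Str.len st.1) else st.2.1
  let res := st.1 ++ "##{" ++ p.2 ++ "}##"
  let end_char := if p.1 = corr_idx then some (PySem.Str.len res) else st.2.2
  (res, start_char, end_char)

def concatenate_answers (answers : List String) (corr_idx : Int) : String × Option Int × Option Int :=
  (PySem.List.enumerate answers).foldl (pvStepA corr_idx) ("", none, none)

-- ===== PORT B =====
def concatenate_answers_alt (answers : List String) (corr_idx : Int) : String × Option Int × Option Int :=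
  let res := PySem.Str.join "" (answers.map (fun a => "##{" ++ a ++ "}##"))
  if 0 ≤ corr_idx ∧ corr_idx < answers.length then
    let start := ((PySem.List.slice answers none (some corr_idx)).map
      (fun a => PySem.Str.len a + 6)).sum
    (res, some start, some (start + PySem.Str.len (PySem.List.pyGetD answers corr_idx "") + 6))
  else
    (res, none, none)

-- ===== PRECONDITION & SPEC =====
def Spec_concatenate_answers (answers : List String) (corr_idx : Int) (out : String × Option Int × Option Int) : Prop := out = concatenate_answers_alt answers corr_idx
instance (answers : List String) (corr_idx : Int) (out : String × Option Int × Option Int) : Decidable (Spec_concatenate_answers answers corr_idx out) := by unfold Spec_concatenate_answers; infer_instance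

-- ===== CLAIM (what is proved, stated in full; the proofs are below) =====
def Claim_equal_concatenate_answers : Prop := ∀ (answers : List String) (corr_idx : Int), Dom_concatenate_answers answers corr_idx → Spec_concatenate_answers answers corr_idx (concatenate_answers answers corr_idx)

-- ===== LEMMAS AND PROOFS =====

-- the decorated concatenation, in foldr form (proof-side helper)
def pvCat (xs : List String) : String :=
  xs.foldr (fun a r => ("##{" ++ a ++ "}##") ++ r) ""

-- the prefix-length sum, in foldr form (proof-side helper)
def pvPre (xs : List String) (n : Nat) : Int :=
  ((xs.take n).map (fun a => PySem.Str.len a + 6)).sum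

lemma pvLenDec (a : String) : PySem.Str.len ("##{" ++ a ++ "}##") = PySem.Str.len a + 6 := by
  rw [PySem.Str.len_append, PySem.Str.len_append]
  have h1 : PySem.Str.len "##{" = 3 := by simp [PySem.Str.len_eq]
  have h2 : PySem.Str.len "}##" = 3 := by simp [PySem.Str.len_eq]
  omega

lemma pvLenDec' (res a : String) :
    PySem.Str.len (res ++ "##{" ++ a ++ "}##") = PySem.Str.len res + (PySem.Str.len a + 6) := by
  rw [show res ++ "##{" ++ a ++ "}##" = res ++ ("##{" ++ a ++ "}##") by
    simp [String.append_assoc]]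
  rw [PySem.Str.len_append, pvLenDec]

lemma pvCatCons (a : String) (as : List String) :
    pvCat (a :: as) = ("##{" ++ a ++ "}##") ++ pvCat as := rfl

lemma pvCharsJoinNilSep (ls : List (List Char)) :
    PySem.Chars.join [] ls = ls.foldr (· ++ ·) [] := by
  induction ls with
  | nil => simp [PySem.Chars.join_nil]
  | cons p rest ih =>
    cases rest with
    | nil => simp [PySem.Chars.join_singleton]
    | cons q r =>
      rw [PySem.Chars.join_cons_cons]
      simp only [List.foldr_cons] at ih ⊢
      rw [ih]; simp

lemma pvCatToList (xs : List String) :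
    (pvCat xs).toList =
      ((xs.map (fun a => "##{" ++ a ++ "}##")).map String.toList).foldr (· ++ ·) [] := by
  induction xs with
  | nil => rfl
  | cons a as ih => simp [pvCat] at ih ⊢; rw [ih]

lemma pvJoinEqCat (xs : List String) :
    PySem.Str.join "" (xs.map (fun a => "##{" ++ a ++ "}##")) = pvCat xs := by
  apply String.ext
  have h := PySem.Str.toList_join "" (xs.map (fun a => "##{" ++ a ++ "}##"))
  have h2 : ("" : String).toList = [] := rfl
  rw [h2, pvCharsJoinNilSep] at h
  have hdata : (PySem.Str.join "" (xs.map (fun a => "##{" ++ a ++ "}##"))).toList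
      = (pvCat xs).toList := by rw [h, pvCatToList]
  simpa [String.toList] using hdata

lemma pvStepA_match (c : Int) (res : String) (o1 o2 : Option Int) (i : Int) (a : String)
    (h : i = c) :
    pvStepA c (res, o1, o2) (i, a) =
      (res ++ "##{" ++ a ++ "}##", some (PySem.Str.len res),
       some (PySem.Str.len (res ++ "##{" ++ a ++ "}##"))) := by
  simp [pvStepA, h]

lemma pvStepA_nomatch (c : Int) (res : String) (o1 o2 : Option Int) (i : Int) (a : String)
    (h : ¬ i = c) :
    pvStepA c (res, o1, o2) (i, a) = (res ++ "##{" ++ a ++ "}##", o1, o2) := by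
  simp [pvStepA, h]

-- after the matching index has passed (corr_idx < s), the fold only appends to res
lemma pvFoldNoMatch (c : Int) (xs : List String) (s : Int) (hs : c < s)
    (res : String) (o1 o2 : Option Int) :
    (PySem.List.enumerate xs s).foldl (pvStepA c) (res, o1, o2) = (res ++ pvCat xs, o1, o2) := by
  induction xs generalizing s res with
  | nil => simp [PySem.List.enumerate, pvCat]
  | cons a as ih =>
    rw [PySem.List.enumerate_cons]
    simp only [List.foldl_cons]
    rw [pvStepA_nomatch c res o1 o2 s a (by omega)]
    rw [ih (s + 1) (by omega)]
    simp [pvCat, String.append_assoc]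

-- index shift: folding over enumerate xs (s+1) with c is folding over enumerate xs s with c-1
lemma pvFoldShift (c : Int) (xs : List String) (s : Int)
    (st : String × Option Int × Option Int) :
    (PySem.List.enumerate xs (s + 1)).foldl (pvStepA c) st =
    (PySem.List.enumerate xs s).foldl (pvStepA (c - 1)) st := by
  induction xs generalizing s st with
  | nil => simp [PySem.List.enumerate]
  | cons a as ih =>
    rw [PySem.List.enumerate_cons, PySem.List.enumerate_cons]
    simp only [List.foldl_cons]
    have hiff : (s + 1 = c) = (s = c - 1) := by apply propext; omega
    rw [show pvStepA c st (s + 1, a) = pvStepA (c - 1) st (s, a) by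
      simp only [pvStepA, hiff]]
    exact ih (s + 1) _

-- main invariant: the fold computes the concatenation plus prefix-sum offsets
lemma pvFoldMain (xs : List String) (c : Int) (res : String) :
    (PySem.List.enumerate xs 0).foldl (pvStepA c) (res, none, none) =
    (res ++ pvCat xs,
     if 0 ≤ c ∧ c < xs.length then some (PySem.Str.len res + pvPre xs c.toNat) else none,
     if 0 ≤ c ∧ c < xs.length then
       some (PySem.Str.len res + pvPre xs c.toNat + PySem.Str.len (xs.getD c.toNat "") + 6)
     else none) := by
  induction xs generalizing c res with
  | nil => simp [PySem.List.enumerate, pvCat]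
  | cons a as ih =>
    rw [PySem.List.enumerate_cons]
    simp only [List.foldl_cons]
    have hcat : res ++ "##{" ++ a ++ "}##" ++ pvCat as = res ++ pvCat (a :: as) := by
      rw [pvCatCons]; simp [String.append_assoc]
    by_cases hc : (0 : Int) = c
    · subst hc
      rw [pvStepA_match 0 res none none 0 a rfl, pvFoldShift]
      have hm1 : (0 : Int) - 1 = -1 := by norm_num
      rw [hm1, pvFoldNoMatch (-1) as 0 (by omega)]
      have hcond : 0 ≤ (0 : Int) ∧ (0 : Int) < ((a :: as).length : Int) :=
        ⟨le_refl 0, by exact_mod_cast Nat.succ_pos as.length⟩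
      rw [if_pos hcond, if_pos hcond, hcat]
      have hp0 : pvPre (a :: as) (Int.toNat 0) = 0 := by simp [pvPre]
      have hg0 : (a :: as).getD (Int.toNat 0) "" = a := rfl
      rw [hp0, hg0, pvLenDec']
      simp only [Prod.mk.injEq, Option.some.injEq]
      refine ⟨trivial, by omega, by omega⟩
    · rw [pvStepA_nomatch c res none none 0 a (fun h => hc h), pvFoldShift, ih (c - 1) _]
      have hcond : (0 ≤ c - 1 ∧ c - 1 < (as.length : Int)) ↔
          (0 ≤ c ∧ c < ((a :: as).length : Int)) := by
        simp only [List.length_cons]; push_cast; omega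
      by_cases hin : 0 ≤ c - 1 ∧ c - 1 < (as.length : Int)
      · have hin' := hcond.mp hin
        have htn : c.toNat = (c - 1).toNat + 1 := by omega
        have hpre : pvPre (a :: as) c.toNat = (PySem.Str.len a + 6) + pvPre as (c - 1).toNat := by
          rw [htn]; simp [pvPre]
        have hget : (a :: as).getD c.toNat "" = as.getD (c - 1).toNat "" := by
          rw [htn]; rfl
        rw [if_pos hin, if_pos hin, if_pos hin', if_pos hin', hcat, hpre, hget, pvLenDec']
        simp only [Prod.mk.injEq, Option.some.injEq]
        refine ⟨trivial, by omega, by omega⟩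
      · have hin' : ¬ (0 ≤ c ∧ c < ((a :: as).length : Int)) := fun h => hin (hcond.mpr h)
        rw [if_neg hin, if_neg hin, if_neg hin', if_neg hin', hcat]

-- ===== VERDICT (by name: the statement is the Claim_ definition above) =====
theorem concatenate_answers_spec : Claim_equal_concatenate_answers := by
  intro answers corr_idx _
  unfold Spec_concatenate_answers concatenate_answers concatenate_answers_alt
  rw [pvFoldMain answers corr_idx ""]
  rw [pvJoinEqCat]
  by_cases h : 0 ≤ corr_idx ∧ corr_idx < (answers.length : Int)
  · obtain ⟨h0, h1⟩ := h
    rw [if_pos ⟨h0, h1⟩, if_pos ⟨h0, h1⟩, if_pos ⟨h0, h1⟩]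
    have hslice : PySem.List.slice answers none (some corr_idx) = List.take corr_idx.toNat answers :=
      PySem.List.slice_to answers h0
    have hget : PySem.List.pyGetD answers corr_idx "" = answers.getD corr_idx.toNat "" := by
      have := PySem.List.pyGetD_natCast answers corr_idx.toNat ""
      rwa [Int.toNat_of_nonneg h0] at this
    have hlen0 : PySem.Str.len "" = 0 := by simp [PySem.Str.len_eq]
    rw [hslice, hget, hlen0]
    show (_, some (0 + pvPre answers corr_idx.toNat), _) = _
    simp only [Prod.mk.injEq, Option.some.injEq, pvPre]
    refine ⟨by simp, by omega, by omega⟩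
  · rw [if_neg h, if_neg h, if_neg h]
    simp
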